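-- pv_equiv track=rewrite | github.com/comp-cogneuro-lang/EARShot_N | Result_Analysis.py | Adjusted_Length_Dict_Generate
-- ===== SOURCE A (Python) =====
-- def Adjusted_Length_Dict_Generate(pronunciation_Dict): #For uniqueness point.
--     adjusted_Length_Dict = {}
--
--     for word, pronunciation in pronunciation_Dict.items():
--         for cut_Length in range(1, len(pronunciation) + 1):
--             cut_Pronunciation = pronunciation[:cut_Length]
--             cut_Comparer_List = [comparer[:cut_Length] for comparer in pronunciation_Dict.values() if pronunciation != comparer]
--             if not cut_Pronunciation in cut_Comparer_List:  #When you see a part of target phoneme string, if there is no other competitor.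
--                 adjusted_Length_Dict[word] = cut_Length - len(pronunciation) - 1
--                 break
--         if not word in adjusted_Length_Dict.keys():
--             adjusted_Length_Dict[word] = 0
--
--     return adjusted_Length_Dict
-- ===== SOURCE B (Python) =====
-- def Adjusted_Length_Dict_Generate(pronunciation_Dict):
--     # Count every proper-or-full prefix of every pronunciation once, then walk
--     # each word's prefixes until the prefix count drops to the count of
--     # pronunciations identical to it (= no competitor shares that prefix).
--     values = list(pronunciation_Dict.values())
--     prefix_Counts = {}
--     for c in values:
--         for k in range(1, len(c) + 1):
--             p = c[:k]
--             prefix_Counts[p] = prefix_Counts.get(p, 0) + 1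
--     full_Counts = {}
--     for c in values:
--         full_Counts[c] = full_Counts.get(c, 0) + 1
--     adjusted_Length_Dict = {}
--     for word, pronunciation in pronunciation_Dict.items():
--         result = 0
--         for k in range(1, len(pronunciation) + 1):
--             if prefix_Counts[pronunciation[:k]] == full_Counts[pronunciation]:
--                 result = k - len(pronunciation) - 1
--                 break
--         adjusted_Length_Dict[word] = result
--     return adjusted_Length_Dict
-- ===== Notes on version B (the rewrite author's own statement) =====
-- stated objective: faster
-- what changed: Instead of rebuilding and scanning the full list of competitor prefixes for every word and every cut length, B counts every pronunciation prefix once in a dictionary and detects a uniqueness point by comparing the prefix count with the count of identical pronunciations.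
import Mathlib
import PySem

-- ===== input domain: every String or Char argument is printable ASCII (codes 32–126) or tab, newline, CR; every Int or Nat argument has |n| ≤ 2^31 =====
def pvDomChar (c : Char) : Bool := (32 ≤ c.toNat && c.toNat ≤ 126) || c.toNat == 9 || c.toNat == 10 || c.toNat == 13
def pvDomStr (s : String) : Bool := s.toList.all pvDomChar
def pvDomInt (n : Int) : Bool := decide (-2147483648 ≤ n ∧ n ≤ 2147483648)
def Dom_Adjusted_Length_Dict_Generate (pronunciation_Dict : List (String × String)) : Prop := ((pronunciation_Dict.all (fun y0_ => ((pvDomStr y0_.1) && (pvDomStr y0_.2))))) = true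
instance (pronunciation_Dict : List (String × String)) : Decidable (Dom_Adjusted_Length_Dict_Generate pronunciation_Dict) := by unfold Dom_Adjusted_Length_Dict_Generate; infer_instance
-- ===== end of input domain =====

-- B replaces A's quadratic all-pairs prefix comparison by a prefix-occurrence counter built once
-- (objective: faster); return value equivalence is proved for every input.

-- ===== PORT A =====
-- inner 'for cut_Length in range(...)' loop with its break, threading the result dict
def pvInnerA (values : List String) (word pron : String)
    (acc : PySem.Dict String Int) : List Int → PySem.Dict String Int
  | [] => acc
  | k :: ks =>
    let cutP := PySem.Str.slice pron none (some k)
    let cutList := (values.filter (fun c => !(pron == c))).map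
      (fun c => PySem.Str.slice c none (some k))
    if !(cutList.contains cutP) then
      acc.insert word (k - PySem.Str.len pron - 1)
    else
      pvInnerA values word pron acc ks

def Adjusted_Length_Dict_Generate (pronunciation_Dict : List (String × String)) : List (String × Int) :=
  let d := PySem.Dict.ofList pronunciation_Dict
  (d.items.foldl (fun acc wp =>
      let acc2 := pvInnerA d.values wp.1 wp.2 acc
        (PySem.List.pyRange 1 (PySem.Str.len wp.2 + 1) 1)
      if !(acc2.contains wp.1) then acc2.insert wp.1 0 else acc2)
    PySem.Dict.empty).items

-- ===== PORT B =====
-- prefix_Counts: for c in values: for k in range(1, len(c)+1): counts[c[:k]] += 1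
def pvCounts (values : List String) : PySem.Dict String Int :=
  values.foldl (fun d c =>
    (PySem.List.pyRange 1 (PySem.Str.len c + 1) 1).foldl (fun d k =>
      let p := PySem.Str.slice c none (some k)
      d.insert p (d.getD p 0 + 1)) d)
    PySem.Dict.empty

-- full_Counts: for c in values: full[c] += 1
def pvFull (values : List String) : PySem.Dict String Int :=
  values.foldl (fun d c => d.insert c (d.getD c 0 + 1)) PySem.Dict.empty

-- the per-word scan with its break ('result' loop)
def pvInnerB (counts : PySem.Dict String Int) (eqc : Int) (pron : String) : List Int → Int
  | [] => 0
  | k :: ks =>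
    if counts.getD (PySem.Str.slice pron none (some k)) 0 == eqc then
      k - PySem.Str.len pron - 1
    else
      pvInnerB counts eqc pron ks

def Adjusted_Length_Dict_Generate_alt (pronunciation_Dict : List (String × String)) : List (String × Int) :=
  let d := PySem.Dict.ofList pronunciation_Dict
  let values := d.values
  let counts := pvCounts values
  let full := pvFull values
  (d.items.foldl (fun acc wp =>
      acc.insert wp.1 (pvInnerB counts (full.getD wp.2 0) wp.2
        (PySem.List.pyRange 1 (PySem.Str.len wp.2 + 1) 1)))
    PySem.Dict.empty).items

-- ===== PRECONDITION & SPEC =====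
def Spec_Adjusted_Length_Dict_Generate (pronunciation_Dict : List (String × String)) (out : List (String × Int)) : Prop := out = Adjusted_Length_Dict_Generate_alt pronunciation_Dict
instance (pronunciation_Dict : List (String × String)) (out : List (String × Int)) : Decidable (Spec_Adjusted_Length_Dict_Generate pronunciation_Dict out) := by unfold Spec_Adjusted_Length_Dict_Generate; infer_instance

-- ===== CLAIM (what is proved, stated in full; the proofs are below) =====
def Claim_equal_Adjusted_Length_Dict_Generate : Prop := ∀ (pronunciation_Dict : List (String × String)), Dom_Adjusted_Length_Dict_Generate pronunciation_Dict → Spec_Adjusted_Length_Dict_Generate pronunciation_Dict (Adjusted_Length_Dict_Generate pronunciation_Dict)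

-- ===== LEMMAS AND PROOFS =====

-- s[:k] on the list side
lemma pvToList_cut (s : String) (k : Int) (hk : 0 ≤ k) :
    (PySem.Str.slice s none (some k)).toList = s.toList.take k.toNat := by
  simp [pysem, PySem.List.slice_to _ hk]

lemma pvToList_cutNat (s : String) (k : Nat) :
    (PySem.Str.slice s none (some (k : Int))).toList = s.toList.take k := by
  rw [pvToList_cut s _ (by positivity)]; norm_num

-- the list of prefixes Source B feeds to prefix_Counts, for one string
def pvPrefs (c : String) : List String :=
  (PySem.List.pyRange 1 (PySem.Str.len c + 1) 1).map
    (fun k => PySem.Str.slice c none (some k))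

-- occurrences of pron[:k] among the prefixes of a single c (at most one: distinct lengths)
lemma pvCount_prefs (c pron : String) (k : Nat) (hk1 : 1 ≤ k) (hk2 : k ≤ pron.toList.length) :
    (pvPrefs c).count (PySem.Str.slice pron none (some (k : Int)))
      = if PySem.Str.slice c none (some (k : Int)) = PySem.Str.slice pron none (some (k : Int))
        then 1 else 0 := by
  set p := PySem.Str.slice pron none (some (k : Int)) with hp
  have hplen : p.toList = pron.toList.take k := pvToList_cutNat pron k
  have hcut : ∀ j : Nat, (PySem.Str.slice c none (some ((1:Int) + (j : Nat)))).toList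
      = c.toList.take (j+1) := by
    intro j
    rw [pvToList_cut c _ (by positivity)]
    congr 1
    omega
  rw [pvPrefs, PySem.List.pyRange_one]
  have hn : (PySem.Str.len c + 1 - 1).toNat = c.toList.length := by simp [pysem]
  rw [hn, List.count_eq_countP, List.countP_map, List.countP_map]
  simp only [Function.comp_def]
  have hcond : ∀ j ∈ List.range c.toList.length,
      ((PySem.Str.slice c none (some ((1 : Int) + (j : Nat))) == p) = true
        ↔ (decide (j = k - 1) && decide (PySem.Str.slice c none (some (k : Int)) = p)) = true) := by
    intro j hj
    have hjn : j < c.toList.length := List.mem_range.mp hj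
    by_cases hjk : j = k - 1
    · subst hjk
      have h1 : ((1 : Int) + ((k-1 : Nat) : Int)) = (k : Int) := by omega
      rw [h1]
      simp
    · have hne : PySem.Str.slice c none (some ((1 : Int) + (j : Nat))) ≠ p := by
        intro heq
        have heq' := congrArg String.toList heq
        rw [hcut j, hplen] at heq'
        have h2 := congrArg List.length heq'
        rw [List.length_take, List.length_take] at h2
        omega
      simp [hne, hjk]
  rw [List.countP_congr hcond]
  by_cases hc : PySem.Str.slice c none (some (k : Int)) = p
  · have hkc : k ≤ c.toList.length := by
      have hc' := congrArg String.toList hc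
      rw [pvToList_cutNat, hplen] at hc'
      have h3 := congrArg List.length hc'
      rw [List.length_take, List.length_take] at h3
      omega
    have h4 : (List.range c.toList.length).countP
        (fun j => decide (j = k - 1) && decide (PySem.Str.slice c none (some (k:Int)) = p))
        = (List.range c.toList.length).count (k-1) := by
      rw [List.count_eq_countP]
      apply List.countP_congr
      intro j _
      rw [decide_eq_true hc, Bool.and_true]
      simp only [decide_eq_true_eq, beq_iff_eq]
    rw [h4, List.count_range, if_pos (by omega), if_pos hc]
  · rw [if_neg hc]
    rw [show (fun j => decide (j = k - 1) && decide (PySem.Str.slice c none (some (k:Int)) = p))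
        = (fun _ => false) from by funext j; simp [hc]]
    simp

-- occurrences of pron[:k] among all prefixes = number of values sharing pron's k-prefix
lemma pvCount_flatMap (values : List String) (pron : String) (k : Nat)
    (hk1 : 1 ≤ k) (hk2 : k ≤ pron.toList.length) :
    (values.flatMap pvPrefs).count (PySem.Str.slice pron none (some (k : Int)))
      = values.countP (fun c => PySem.Str.slice c none (some (k : Int))
          == PySem.Str.slice pron none (some (k : Int))) := by
  induction values with
  | nil => simp
  | cons c cs ih =>
    rw [List.flatMap_cons, List.count_append, List.countP_cons,
      pvCount_prefs c pron k hk1 hk2, ih]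
    by_cases hc : PySem.Str.slice c none (some (k : Int)) = PySem.Str.slice pron none (some (k : Int))
    · simp [hc]
      omega
    · simp [hc]

-- pvCounts is the counter of the flattened prefix list
lemma pvCounts_getD (values : List String) (p : String) :
    (pvCounts values).getD p 0 = ((values.flatMap pvPrefs).count p : Int) := by
  rw [pvCounts]
  rw [show (fun (d : PySem.Dict String Int) (c : String) =>
      (PySem.List.pyRange 1 (PySem.Str.len c + 1) 1).foldl (fun d k =>
        let p := PySem.Str.slice c none (some k)
        d.insert p (d.getD p 0 + 1)) d)
    = (fun d c => (pvPrefs c).foldl (fun d p => d.insert p (d.getD p 0 + 1)) d) from by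
      funext d c; rw [pvPrefs, List.foldl_map]]
  rw [← List.foldl_flatMap]
  simp [PySem.Dict.getD_foldl_insert_add_one, PySem.Dict.getD_empty]

-- pvFull is the counter of values
lemma pvFull_getD (values : List String) (p : String) :
    (pvFull values).getD p 0 = (values.count p : Int) := by
  simp [pvFull, PySem.Dict.getD_foldl_insert_add_one, PySem.Dict.getD_empty]

-- counting characterisation of "no competitor shares this prefix"
lemma pvCountP_eq_count_iff (l : List String) (pron : String) (P : String → Bool)
    (hP : P pron = true) :
    (l.countP P = l.count pron) ↔ (∀ c ∈ l, P c = true → c = pron) := by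
  induction l with
  | nil => simp
  | cons c cs ih =>
    by_cases hc : c = pron
    · simp [hc, hP, ih]
    · by_cases hpc : P c = true
      · have h1 : (c::cs).countP P = cs.countP P + 1 := by simp [hpc]
        have h2 : (c::cs).count pron = cs.count pron := by simp [hc]
        have hle : cs.count pron ≤ cs.countP P := by
          rw [List.count_eq_countP]
          exact List.countP_mono_left (fun x _ hx => by
            have : x = pron := by simpa using hx
            simpa [this] using hP)
        rw [h1, h2]
        constructor
        · intro h; omega
        · intro h; exact absurd (h c (by simp) hpc) hc
      · simp [hc, hpc, ih]

-- the two break conditions agree for 1 ≤ k ≤ len(pron)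
lemma pvCond_eq (values : List String) (pron : String) (k : Int)
    (hk1 : 1 ≤ k) (hk2 : k ≤ (pron.toList.length : Int)) :
    ((pvCounts values).getD (PySem.Str.slice pron none (some k)) 0
        == (pvFull values).getD pron 0)
      = !(((values.filter (fun c => !(pron == c))).map
            (fun c => PySem.Str.slice c none (some k))).contains
          (PySem.Str.slice pron none (some k))) := by
  obtain ⟨kn, rfl⟩ : ∃ n : Nat, k = (n : Int) := ⟨k.toNat, by omega⟩
  have hk1' : 1 ≤ kn := by exact_mod_cast hk1
  have hk2' : kn ≤ pron.toList.length := by exact_mod_cast hk2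
  rw [Bool.eq_iff_iff]
  rw [pvCounts_getD, pvFull_getD, beq_iff_eq, Int.natCast_inj,
    pvCount_flatMap values pron kn hk1' hk2',
    pvCountP_eq_count_iff values pron _ (by simp)]
  simp only [Bool.not_eq_eq_eq_not, Bool.not_true, ← Bool.not_eq_true,
    List.contains_eq_mem, decide_eq_true_eq, List.mem_map, List.mem_filter,
    beq_iff_eq]
  constructor
  · rintro h ⟨c, ⟨hcv, hne⟩, heq⟩
    exact hne (h c hcv heq).symm
  · intro h c hcv heq
    by_contra hne
    exact h ⟨c, ⟨hcv, fun e => hne e.symm⟩, heq⟩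

-- one word: A's break loop + the 'if word not in keys' patch  =  insert of B's scan result
lemma pvStep_eq (values : List String) (word pron : String) (ks : List Int)
    (hks : ∀ k ∈ ks, 1 ≤ k ∧ k ≤ (pron.toList.length : Int))
    (acc : PySem.Dict String Int) (hfresh : acc.contains word = false) :
    (let acc2 := pvInnerA values word pron acc ks;
     if !(acc2.contains word) then acc2.insert word 0 else acc2)
      = acc.insert word (pvInnerB (pvCounts values) ((pvFull values).getD pron 0) pron ks) := by
  induction ks generalizing acc with
  | nil =>
    simp only [pvInnerA, pvInnerB]
    rw [hfresh]
    simp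
  | cons k ks ih =>
    have hk := hks k List.mem_cons_self
    have hcond := pvCond_eq values pron k hk.1 hk.2
    simp only [pvInnerA, pvInnerB]
    rw [← hcond]
    cases hguard : ((pvCounts values).getD (PySem.Str.slice pron none (some k)) 0
        == (pvFull values).getD pron 0) with
    | true =>
      simp [PySem.Dict.contains_insert_self]
    | false =>
      have h := ih (fun k' hk' => hks k' (List.mem_cons_of_mem _ hk')) acc hfresh
      simpa using h

-- the whole fold, over items with pairwise-distinct fresh keys
lemma pvFold_eq (values : List String) (items : List (String × String))
    (acc : PySem.Dict String Int)
    (hnd : (items.map Prod.fst).Nodup)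
    (hfresh : ∀ wp ∈ items, acc.contains wp.1 = false) :
    items.foldl (fun acc wp =>
      let acc2 := pvInnerA values wp.1 wp.2 acc
        (PySem.List.pyRange 1 (PySem.Str.len wp.2 + 1) 1)
      if !(acc2.contains wp.1) then acc2.insert wp.1 0 else acc2) acc
    = items.foldl (fun acc wp =>
        acc.insert wp.1 (pvInnerB (pvCounts values) ((pvFull values).getD wp.2 0) wp.2
          (PySem.List.pyRange 1 (PySem.Str.len wp.2 + 1) 1))) acc := by
  induction items generalizing acc with
  | nil => rfl
  | cons wp items ih =>
    simp only [List.foldl_cons]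
    have hb : ∀ k ∈ PySem.List.pyRange 1 (PySem.Str.len wp.2 + 1) 1,
        1 ≤ k ∧ k ≤ (wp.2.toList.length : Int) := by
      intro k hkmem
      have hmem := (PySem.List.mem_pyRange_one).mp hkmem
      have hlen : PySem.Str.len wp.2 = (wp.2.toList.length : Int) := by simp [pysem]
      rw [hlen] at hmem
      exact ⟨hmem.1, by omega⟩
    rw [pvStep_eq values wp.1 wp.2 _ hb acc (hfresh wp List.mem_cons_self)]
    have hnd' : wp.1 ∉ items.map Prod.fst ∧ (items.map Prod.fst).Nodup := by
      simpa [List.nodup_cons] using hnd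
    apply ih
    · exact hnd'.2
    · intro wp' hwp'
      rw [PySem.Dict.contains_insert]
      have hne : wp'.1 ≠ wp.1 := by
        intro e
        exact hnd'.1 (e ▸ List.mem_map_of_mem hwp')
      simp [hne, hfresh wp' (List.mem_cons_of_mem _ hwp')]

-- ===== VERDICT (by name: the statement is the Claim_ definition above) =====
theorem Adjusted_Length_Dict_Generate_spec : Claim_equal_Adjusted_Length_Dict_Generate := by
  intro pd _
  unfold Spec_Adjusted_Length_Dict_Generate Adjusted_Length_Dict_Generate Adjusted_Length_Dict_Generate_alt
  have h := pvFold_eq (PySem.Dict.ofList pd).values (PySem.Dict.ofList pd).items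
    PySem.Dict.empty ?_ ?_
  · simp only [h]
  · exact PySem.Dict.nodup_keys_ofList pd
  · intro wp _; exact PySem.Dict.contains_empty _
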